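-- pv_equiv track=rewrite | github.com/oandregal/mapastematicos | trunk/src/mapserver/dao.py | getRangesFromValues
-- ===== SOURCE A (Python) =====
-- def getRangesFromValues(values, nranges, method):
--     # nranges : numero de rangos
--     # method : por si queremos implementar cuantiles, naturales, ..
--     # tratar la lista ranges como range[0] <= values < range[1] ; range[n-1]<= values < range[n]
--     maximum = max(values)
--     minimum = min(values)
--     step = int((maximum - minimum) / nranges)
--     ranges = [minimum]
--
--     for i in range(nranges):
--         ranges.append(ranges[i*2]+step)
--         ranges.append(ranges[i*2]+step)
--
--     # uso como último valor del rango el máximo+1 de modo que me aseguro que todos los values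
--     # + estarán por debajo
--     ranges.pop()
--     ranges.append(maximum+1)
--
--     return ranges
-- ===== SOURCE B (Python) =====
-- def getRangesFromValues(values, nranges, method):
--     # Closed-form boundary ladder + flatten, instead of A's growing-list index loop.
--     maximum = max(values)
--     minimum = min(values)
--     step = int((maximum - minimum) / nranges)
--     n = nranges if nranges > 0 else 0
--     doubled = [b for k in range(n + 1) for b in (minimum + k * step, minimum + k * step)]
--     return doubled[1:-1] + [maximum + 1]
-- ===== Notes on version B (the rewrite author's own statement) =====
-- stated objective: simpler
-- what changed: Replaces A's self-indexing growing-list loop (ranges[i*2] reads plus pop/append patch-up) with a closed-form doubled boundary ladder built by a comprehension, trimmed with doubled[1:-1] and the final maximum+1 appended.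
import Mathlib
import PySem

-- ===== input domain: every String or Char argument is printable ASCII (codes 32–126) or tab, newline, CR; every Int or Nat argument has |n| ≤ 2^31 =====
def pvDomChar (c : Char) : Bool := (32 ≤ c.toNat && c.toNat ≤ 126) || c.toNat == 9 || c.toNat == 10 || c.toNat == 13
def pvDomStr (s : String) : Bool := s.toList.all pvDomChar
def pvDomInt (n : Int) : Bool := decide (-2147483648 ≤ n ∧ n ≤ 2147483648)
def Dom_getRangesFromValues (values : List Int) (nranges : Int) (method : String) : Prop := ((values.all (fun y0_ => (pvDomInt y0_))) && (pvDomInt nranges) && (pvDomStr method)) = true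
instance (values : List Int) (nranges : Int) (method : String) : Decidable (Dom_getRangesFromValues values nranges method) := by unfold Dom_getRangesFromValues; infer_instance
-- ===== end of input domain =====

-- B builds the doubled boundary ladder in closed form and trims it, instead of A's
-- self-indexing growing-list loop; same values on all admitted inputs (objective: simpler).

-- ===== PORT A =====
-- int((maximum-minimum)/nranges): on Dom |maximum-minimum| ≤ 2^32, so the float
-- quotient truncates exactly to Int.tdiv (truncation toward zero, like Python's int()).
def getRangesFromValues (values : List Int) (nranges : Int) (method : String) : List Int :=
  match PySem.List.max? values (fun y => y), PySem.List.min? values (fun y => y) with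
  | some maximum, some minimum =>
    let step : Int := Int.tdiv (maximum - minimum) nranges
    let ranges : List Int :=
      (PySem.List.pyRange 0 nranges 1).foldl (fun ranges i =>
        let ranges := ranges ++ [(PySem.List.pyGet? ranges (i * 2)).getD 0 + step]
        ranges ++ [(PySem.List.pyGet? ranges (i * 2)).getD 0 + step]) [minimum]
    -- ranges.pop(); ranges.append(maximum+1)  (ranges is always nonempty; index i*2 always in range)
    ranges.dropLast ++ [maximum + 1]
  | _, _ => []      -- max()/min() of an empty list raises ValueError; excluded by Pre_

-- ===== PORT B =====
def getRangesFromValues_alt (values : List Int) (nranges : Int) (method : String) : List Int :=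
  -- max()/min() of an empty list raises ValueError (the none case); excluded by Pre_
  (((PySem.List.max? values (fun y => y)).bind (fun maximum =>
    (PySem.List.min? values (fun y => y)).map (fun minimum =>
      let step : Int := Int.tdiv (maximum - minimum) nranges
      let n : Int := if nranges > 0 then nranges else 0
      let doubled : List Int :=
        (PySem.List.pyRange 0 (n + 1) 1).flatMap
          (fun k => [minimum + k * step, minimum + k * step])
      PySem.List.slice doubled (some 1) (some (-1)) ++ [maximum + 1])))).getD []

-- ===== PRECONDITION & SPEC =====
-- Pre_ excludes exactly the inputs where A raises: empty values (ValueError from max())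
-- and nranges = 0 (ZeroDivisionError); B raises on the same inputs.
def Pre_getRangesFromValues (values : List Int) (nranges : Int) (method : String) : Prop :=
  values ≠ [] ∧ nranges ≠ 0
instance (values : List Int) (nranges : Int) (method : String) : Decidable (Pre_getRangesFromValues values nranges method) := by unfold Pre_getRangesFromValues; infer_instance
def pvWitness_getRangesFromValues : List Int × Int × String := ([1, 9, 4], 3, "equal")

def Spec_getRangesFromValues (values : List Int) (nranges : Int) (method : String) (out : List Int) : Prop := out = getRangesFromValues_alt values nranges method
instance (values : List Int) (nranges : Int) (method : String) (out : List Int) : Decidable (Spec_getRangesFromValues values nranges method out) := by unfold Spec_getRangesFromValues; infer_instance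

-- ===== CLAIM (what is proved, stated in full; the proofs are below) =====
def Claim_equal_getRangesFromValues : Prop := ∀ (values : List Int) (nranges : Int) (method : String), Dom_getRangesFromValues values nranges method → Pre_getRangesFromValues values nranges method → Spec_getRangesFromValues values nranges method (getRangesFromValues values nranges method)

-- ===== LEMMAS AND PROOFS =====

-- b-th boundary of the ladder
def pvBseq (minimum step : Int) (k : ℕ) : Int := minimum + (k : Int) * step

-- the doubled tail A's loop has appended after m iterations
def pvFlat (minimum step : Int) (m : ℕ) : List Int :=
  (List.range m).flatMap (fun k => [pvBseq minimum step (k + 1), pvBseq minimum step (k + 1)])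

-- A's list state after m iterations
def pvL (minimum step : Int) (m : ℕ) : List Int := minimum :: pvFlat minimum step m

lemma pvFlat_succ (minimum step : Int) (m : ℕ) :
    pvFlat minimum step (m + 1)
      = pvFlat minimum step m ++ [pvBseq minimum step (m + 1), pvBseq minimum step (m + 1)] := by
  simp [pvFlat, List.range_succ]

lemma pvL_length (minimum step : Int) (m : ℕ) :
    (pvL minimum step m).length = 2 * m + 1 := by
  induction m with
  | zero => simp [pvL, pvFlat]
  | succ m ih =>
    simp only [pvL, pvFlat_succ] at *
    simp at ih ⊢
    omega

lemma pvL_getLast? (minimum step : Int) (m : ℕ) :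
    (pvL minimum step m).getLast? = some (pvBseq minimum step m) := by
  cases m with
  | zero => simp [pvL, pvFlat, pvBseq]
  | succ m =>
    have h : ∀ (x a : Int) (l : List Int), (x :: (l ++ [a, a])).getLast? = some a := by
      intro x a l
      induction l generalizing x with
      | nil => simp
      | cons y t ih => rw [List.cons_append, List.getLast?_cons_cons]; exact ih y
    rw [pvL, pvFlat_succ]
    exact h _ _ _

lemma pvL_get_last (minimum step : Int) (m : ℕ) :
    (pvL minimum step m)[2 * m]? = some (pvBseq minimum step m) := by
  have h := pvL_getLast? minimum step m
  rwa [List.getLast?_eq_getElem?, pvL_length] at h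

-- one iteration of A's loop body applied to the state pvL m
lemma pv_step (minimum step : Int) (m : ℕ) :
    (fun (ranges : List Int) (i : Int) =>
        let ranges := ranges ++ [(PySem.List.pyGet? ranges (i * 2)).getD 0 + step]
        ranges ++ [(PySem.List.pyGet? ranges (i * 2)).getD 0 + step])
      (pvL minimum step m) (m : Int)
      = pvL minimum step (m + 1) := by
  have hidx : ((m : Int) * 2) = ((2 * m : ℕ) : Int) := by push_cast; ring
  have hget : PySem.List.pyGet? (pvL minimum step m) ((m : Int) * 2)
      = some (pvBseq minimum step m) := by
    rw [hidx, PySem.List.pyGet?_natCast, pvL_get_last]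
  have hlt : 2 * m < (pvL minimum step m).length := by rw [pvL_length]; omega
  have hget2 : PySem.List.pyGet?
      (pvL minimum step m ++ [pvBseq minimum step m + step]) ((m : Int) * 2)
      = some (pvBseq minimum step m) := by
    rw [hidx, PySem.List.pyGet?_natCast, List.getElem?_append_left hlt]
    have h := pvL_get_last minimum step m
    simpa using h
  simp only [hget, hget2, Option.getD_some]
  have hb : pvBseq minimum step m + step = pvBseq minimum step (m + 1) := by
    simp [pvBseq]; push_cast; ring
  rw [hb]
  simp [pvL, pvFlat_succ]

-- A's whole loop, for m iterations
lemma pv_loop (minimum step : Int) (m : ℕ) :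
    (PySem.List.pyRange 0 (m : Int) 1).foldl (fun ranges i =>
        let ranges := ranges ++ [(PySem.List.pyGet? ranges (i * 2)).getD 0 + step]
        ranges ++ [(PySem.List.pyGet? ranges (i * 2)).getD 0 + step]) [minimum]
      = pvL minimum step m := by
  induction m with
  | zero =>
    rw [PySem.List.pyRange_one_eq_nil (by omega)]
    simp [pvL, pvFlat]
  | succ m ih =>
    rw [show (((m + 1 : ℕ)) : Int) = (m : Int) + 1 by push_cast; ring,
        PySem.List.pyRange_one_succ_right (by positivity), List.foldl_append, ih]
    simpa using pv_step minimum step m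

-- B's doubled ladder over m+1 boundaries, with the head stripped, is A's state pvL m
lemma pv_doubled (minimum step : Int) (m : ℕ) :
    (PySem.List.pyRange 0 ((m : Int) + 1) 1).flatMap
        (fun k => [minimum + k * step, minimum + k * step])
      = minimum :: pvL minimum step m := by
  induction m with
  | zero =>
    rw [show ((0 : ℕ) : Int) + 1 = 0 + 1 by norm_num, PySem.List.pyRange_one_singleton]
    simp [pvL, pvFlat]
  | succ m ih =>
    rw [show (((m + 1 : ℕ)) : Int) + 1 = ((m : Int) + 1) + 1 by push_cast; ring,
        PySem.List.pyRange_one_succ_right (by positivity), List.flatMap_append, ih]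
    simp [pvL, pvFlat_succ, pvBseq]

-- trimming B's doubled ladder gives A's popped list
lemma pv_core (minimum step : Int) (m : ℕ) :
    PySem.List.slice
        ((PySem.List.pyRange 0 ((m : Int) + 1) 1).flatMap
          (fun k => [minimum + k * step, minimum + k * step])) (some 1) (some (-1))
      = (pvL minimum step m).dropLast := by
  rw [pv_doubled, PySem.List.slice]
  simp [pvL_length, List.dropLast_eq_take]

theorem getRangesFromValues_spec : Claim_equal_getRangesFromValues := by
  intro values nranges method _ hpre
  obtain ⟨hne, hnz⟩ := hpre
  cases hmax : PySem.List.max? values (fun y => y) with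
  | none => exact absurd ((PySem.List.max?_eq_none_iff values (fun y => y)).mp hmax) hne
  | some maximum =>
  cases hmin : PySem.List.min? values (fun y => y) with
  | none => exact absurd ((PySem.List.min?_eq_none_iff values (fun y => y)).mp hmin) hne
  | some minimum =>
  have h1 : PySem.List.pyRange 0 nranges 1 = PySem.List.pyRange 0 ((nranges.toNat : ℕ) : Int) 1 := by
    by_cases h : 0 < nranges
    · rw [Int.toNat_of_nonneg h.le]
    · rw [PySem.List.pyRange_one_eq_nil (by omega),
        PySem.List.pyRange_one_eq_nil (by omega)]
  have h2 : (if nranges > 0 then nranges else 0) = ((nranges.toNat : ℕ) : Int) := by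
    by_cases h : 0 < nranges
    · simp [h, Int.toNat_of_nonneg h.le]
    · simp [h]; omega
  unfold Spec_getRangesFromValues getRangesFromValues getRangesFromValues_alt
  rw [hmax, hmin]
  simp only [h1, h2, pv_loop, pv_core, Option.map_some]
  rfl
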